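-- pv_equiv track=rewrite | github.com/HongMinYeong/Algorithm | programmers/Lv.0/#120812.py | solution
-- ===== SOURCE A (Python) =====
-- def solution(array):
--     # 최빈값이 여러개면 -1 return
--     # 최빈값 return
--     a_dict = {}
--
--     for cur in array:
--         if cur in a_dict:
--             a_dict[cur] += 1
--         else:
--             a_dict[cur] = 1
--
--     max_count = 0  # 가장 많이 나타난 횟수
--     answer = None  # 최빈값 초기값을 None으로 설정
--
--     for key, value in a_dict.items():
--         if value > max_count:
--             max_count = value
--             answer = int(key)  # key를 정수로 변환하여 저장
--         elif value == max_count: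
--             # 최빈값이 여러 개인 경우
--             answer = -1
--
--
--     return answer
-- ===== SOURCE B (Python) =====
-- def solution(array):
--     counts = {}
--     for x in array:
--         counts[x] = counts.get(x, 0) + 1
--     m = max(counts.values())
--     modes = [k for k, v in counts.items() if v == m]
--     return int(modes[0]) if len(modes) == 1 else -1
-- ===== Notes on version B (the rewrite author's own statement) =====
-- stated objective: simpler
-- what changed: replaces A's single running-max-with-tie-flag scan over the frequency table by max(counts.values()) followed by a filter for the modes, returning modes[0] iff it is unique
-- outside the precondition, e.g. on solution([]): A returns None, B raises ValueError
import Mathlib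
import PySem

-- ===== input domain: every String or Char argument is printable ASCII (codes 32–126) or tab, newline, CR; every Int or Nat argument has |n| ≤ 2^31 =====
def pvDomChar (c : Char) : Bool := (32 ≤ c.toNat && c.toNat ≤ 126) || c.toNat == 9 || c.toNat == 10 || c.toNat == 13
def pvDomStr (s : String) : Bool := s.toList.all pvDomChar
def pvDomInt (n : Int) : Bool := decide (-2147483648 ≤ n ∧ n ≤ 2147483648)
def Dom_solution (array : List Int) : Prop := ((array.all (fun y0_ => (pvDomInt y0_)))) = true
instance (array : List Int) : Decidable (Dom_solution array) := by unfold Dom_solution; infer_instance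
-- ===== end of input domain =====

-- B replaces A's running-max-with-tie-flag scan over the frequency table by max() followed by a
-- filter for the modes (a simpler decomposition, same cost).

-- ===== PORT A =====
-- A's second loop: state (max_count, answer)
def solutionAStep (st : Int × Option Int) (kv : Int × Int) : Int × Option Int :=
  if kv.2 > st.1 then (kv.2, some kv.1)
  else if kv.2 = st.1 then (st.1, some (-1))
  else st

def solution (array : List Int) : Int :=
  let aDict := array.foldl (fun d cur =>
      match d.get? cur with
      | some v => d.insert cur (v + 1)
      | none => d.insert cur 1) (PySem.Dict.empty : PySem.Dict Int Int)
  let st := aDict.items.foldl solutionAStep (0, none)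
  -- Python returns None (answer's initial value) only on the empty array, excluded by Pre_
  st.2.getD 0

-- ===== PORT B =====
def solution_alt (array : List Int) : Int :=
  let counts := array.foldl (fun d x => d.insert x (d.getD x 0 + 1)) (PySem.Dict.empty : PySem.Dict Int Int)
  match PySem.List.max? counts.values (fun y => y) with
  | none => 0  -- max() raises ValueError on the empty dict; excluded by Pre_
  | some m =>
    let modes := (counts.items.filter (fun kv => kv.2 = m)).map Prod.fst
    if modes.length = 1 then (PySem.List.pyGet? modes 0).getD 0 else -1

-- ===== PRECONDITION & SPEC =====
-- Pre_ excludes only the empty list, on which A returns None (not an Int value) and B raises ValueError.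
def Pre_solution (array : List Int) : Prop := array ≠ []
instance (array : List Int) : Decidable (Pre_solution array) := by unfold Pre_solution; infer_instance

def pvWitness_solution : List Int := [1, 2, 2]

def Spec_solution (array : List Int) (out : Int) : Prop := out = solution_alt array
instance (array : List Int) (out : Int) : Decidable (Spec_solution array out) := by unfold Spec_solution; infer_instance

-- ===== CLAIM (what is proved, stated in full; the proofs are below) =====
def Claim_equal_solution : Prop := ∀ (array : List Int), Dom_solution array → Pre_solution array → Spec_solution array (solution array)

-- ===== LEMMAS AND PROOFS =====

-- the maximum count, as the fold both programs reduce to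
def maxv (l : List (Int × Int)) : Int := (l.map Prod.snd).foldl max 0

lemma step_def (M : Int) (a : Option Int) (x : Int × Int) :
    solutionAStep (M, a) x =
      if x.2 > M then (x.2, some x.1) else if x.2 = M then (M, some (-1)) else (M, a) := rfl

lemma maxv_append (l : List (Int × Int)) (x : Int × Int) :
    maxv (l ++ [x]) = max (maxv l) x.2 := by
  simp [maxv]

lemma foldl_max_mem (t : List Int) (a : Int) : t.foldl max a = a ∨ t.foldl max a ∈ t := by
  induction t generalizing a with
  | nil => left; rfl
  | cons y ys ih =>
    simp only [List.foldl_cons]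
    rcases ih (max a y) with h | h
    · rcases le_total a y with hle | hge
      · right; rw [h, max_eq_right hle]; exact List.mem_cons_self ..
      · left; rw [h, max_eq_left hge]
    · right; exact List.mem_cons_of_mem _ h

lemma snd_le_maxv (l : List (Int × Int)) (p : Int × Int) (hp : p ∈ l) : p.2 ≤ maxv l :=
  (PySem.List.le_foldl_max (l.map Prod.snd) 0).2 p.2 (List.mem_map_of_mem hp)

lemma maxv_mem (l : List (Int × Int)) (hpos : ∀ p ∈ l, 1 ≤ p.2) (hne : l ≠ []) :
    ∃ p ∈ l, p.2 = maxv l := by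
  cases l with
  | nil => exact absurd rfl hne
  | cons y ys =>
    have hy : (1 : Int) ≤ y.2 := hpos y (List.mem_cons_self ..)
    have hm : maxv (y :: ys) = (ys.map Prod.snd).foldl max y.2 := by
      simp [maxv, max_eq_right (by omega : (0:Int) ≤ y.2)]
    rcases foldl_max_mem (ys.map Prod.snd) y.2 with h | h
    · exact ⟨y, List.mem_cons_self .., by rw [hm, h]⟩
    · obtain ⟨q, hq, hq2⟩ := List.mem_map.mp h
      exact ⟨q, List.mem_cons_of_mem _ hq, by rw [hm, hq2]⟩

-- B's max(counts.values()) computes maxv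
lemma max?_values (l : List (Int × Int)) (hpos : ∀ p ∈ l, 1 ≤ p.2) (hne : l ≠ []) :
    PySem.List.max? (l.map Prod.snd) (fun y => y) = some (maxv l) := by
  cases l with
  | nil => exact absurd rfl hne
  | cons p t =>
    have hp1 : (1 : Int) ≤ p.2 := hpos p (List.mem_cons_self ..)
    rw [List.map_cons, PySem.List.max?_id_cons]
    congr 1
    simp [maxv, max_eq_right (by omega : (0:Int) ≤ p.2)]

-- the invariant of A's running scan, in terms of B's max-then-filter reading
lemma loopA (l : List (Int × Int)) (hpos : ∀ p ∈ l, 1 ≤ p.2) (hne : l ≠ []) :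
    l.foldl solutionAStep (0, none) =
      (maxv l, some (if (l.filter (fun p => p.2 = maxv l)).length = 1
                     then ((l.filter (fun p => p.2 = maxv l)).headD (0, 0)).1 else -1)) := by
  induction l using List.reverseRecOn with
  | nil => exact absurd rfl hne
  | append_singleton l x ih =>
    have hx : (1 : Int) ≤ x.2 := hpos x (by simp)
    have hposl : ∀ p ∈ l, 1 ≤ p.2 := fun p hp => hpos p (by simp [hp])
    rcases eq_or_ne l [] with rfl | hl
    · rw [List.nil_append, List.foldl_cons, List.foldl_nil, step_def,
        if_pos (by omega : x.2 > 0)]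
      have hmx : maxv [x] = x.2 := by
        simp [maxv, max_eq_right (by omega : (0:Int) ≤ x.2)]
      rw [hmx]
      have hf : [x].filter (fun p => p.2 = x.2) = [x] := by simp
      rw [hf]
      rfl
    · rw [List.foldl_append, ih hposl hl, List.foldl_cons, List.foldl_nil, step_def]
      have hM := maxv_append l x
      rcases lt_trichotomy (maxv l) x.2 with hgt | heq | hlt
      · -- new strict maximum: the filter keeps only x
        have hmx : maxv (l ++ [x]) = x.2 := by rw [hM]; omega
        rw [if_pos hgt, hmx]
        have hfl : l.filter (fun p => p.2 = x.2) = [] := by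
          apply List.filter_eq_nil_iff.mpr
          intro p hp
          have := snd_le_maxv l p hp
          simp only [decide_eq_true_eq]
          omega
        have hf : (l ++ [x]).filter (fun p => p.2 = x.2) = [x] := by
          rw [List.filter_append, hfl, List.nil_append]; simp
        rw [hf]
        rfl
      · -- tie with the running maximum: at least two modes
        have hmx : maxv (l ++ [x]) = maxv l := by rw [hM]; omega
        rw [if_neg (by omega : ¬ x.2 > maxv l), if_pos heq.symm, hmx]
        have hf : (l ++ [x]).filter (fun p => p.2 = maxv l)
            = l.filter (fun p => p.2 = maxv l) ++ [x] := by
          rw [List.filter_append]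
          simp [heq.symm]
        obtain ⟨q, hq, hq2⟩ := maxv_mem l hposl hl
        have hqf : q ∈ l.filter (fun p => p.2 = maxv l) := by
          simp [List.mem_filter, hq, hq2]
        have hlen : ¬ ((l ++ [x]).filter (fun p => p.2 = maxv l)).length = 1 := by
          rw [hf, List.length_append]
          have := List.length_pos_of_mem hqf
          simp only [List.length_cons, List.length_nil]
          omega
        rw [if_neg hlen]
      · -- below the running maximum: nothing changes
        have hmx : maxv (l ++ [x]) = maxv l := by rw [hM]; omega
        rw [if_neg (not_lt.mpr hlt.le), if_neg (ne_of_lt hlt), hmx]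
        have hf : (l ++ [x]).filter (fun p => p.2 = maxv l)
            = l.filter (fun p => p.2 = maxv l) := by
          rw [List.filter_append]
          simp [hlt.ne]
        rw [hf]

-- A's second loop and B's max-then-filter agree on any positive nonempty table
lemma key_eq (l : List (Int × Int)) (hpos : ∀ p ∈ l, 1 ≤ p.2) (hne : l ≠ []) :
    ((l.foldl solutionAStep (0, none)).2.getD 0 : Int)
      = match PySem.List.max? (l.map Prod.snd) (fun y => y) with
        | none => 0
        | some m =>
          if ((l.filter (fun kv => kv.2 = m)).map Prod.fst).length = 1
          then (PySem.List.pyGet? ((l.filter (fun kv => kv.2 = m)).map Prod.fst) 0).getD 0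
          else -1 := by
  rw [max?_values l hpos hne, loopA l hpos hne]
  simp only [Option.getD_some, List.length_map]
  by_cases h1 : (l.filter (fun p => p.2 = maxv l)).length = 1
  · rw [if_pos h1, if_pos h1]
    cases hf : l.filter (fun p => p.2 = maxv l) with
    | nil => rw [hf] at h1; simp at h1
    | cons q r =>
      have hr : r = [] := by
        rw [hf] at h1
        simp only [List.length_cons] at h1
        exact List.eq_nil_of_length_eq_zero (by omega)
      subst hr
      rfl
  · rw [if_neg h1, if_neg h1]

-- A's counter-building loop is B's (and both are PySem.Dict.counter)
lemma build_eq (array : List Int) :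
    array.foldl (fun d cur =>
      match d.get? cur with
      | some v => d.insert cur (v + 1)
      | none => d.insert cur 1) (PySem.Dict.empty : PySem.Dict Int Int)
    = PySem.Dict.counter array := by
  rw [← PySem.Dict.foldl_insert_getD_add_one_eq_counter]
  congr 1
  funext d x
  cases h : d.get? x with
  | none => simp [PySem.Dict.getD_eq_get?_getD, h]
  | some v => simp [PySem.Dict.getD_eq_get?_getD, h]

-- ===== VERDICT (by name: the statement is the Claim_ definition above) =====
theorem solution_spec : Claim_equal_solution := by
  intro array _ hpre
  unfold Spec_solution solution solution_alt
  rw [build_eq, PySem.Dict.foldl_insert_getD_add_one_eq_counter]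
  have hpos : ∀ p ∈ (PySem.Dict.counter array).items, 1 ≤ p.2 := by
    intro p hp
    rw [PySem.Dict.items_counter] at hp
    obtain ⟨k, hk, rfl⟩ := List.mem_map.mp hp
    have hmem : k ∈ array := (PySem.Set.mem_ofList array k).mp hk
    have : 0 < array.count k := List.count_pos_iff.mpr hmem
    simp only
    omega
  have hne : (PySem.Dict.counter array).items ≠ [] := by
    rw [PySem.Dict.items_counter]
    cases harr : array with
    | nil => exact absurd harr hpre
    | cons a t =>
      have : a ∈ PySem.Set.ofList (a :: t) := (PySem.Set.mem_ofList ..).mpr (by simp)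
      intro h
      rw [List.map_eq_nil_iff] at h
      rw [h] at this
      exact absurd this (by simp)
  exact key_eq (PySem.Dict.counter array).items hpos hne
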